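-- pv_equiv track=rewrite | github.com/ksyoon70/RealTimeObjectDetection-main | label_tools.py | isInside
-- ===== SOURCE A (Python) =====
-- def isInside(box1, box2):
--     #box1 = (y1, x1, y2, x2)
--     #box2 = (y1, x1, y2, x2)
--
--   # First we make sure we compare things in the right order
--   # You can skip that part if you are sure that in all cases x1 < x2 and y1 < y2
--   b1_xmin = min(box1[1], box1[3])
--   b1_xmax = max(box1[1], box1[3])
--   b1_ymin = min(box1[0], box1[2])
--   b1_ymax = max(box1[0], box1[2])
--
--   b2_xmin = min(box2[1], box2[3])
--   b2_xmax = max(box2[1], box2[3])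
--   b2_ymin = min(box2[0], box2[2])
--   b2_ymax = max(box2[0], box2[2])
--
--   # Then you perform your checks. From what I understood,
--   # you want the result to be true if any corner of the box1
--   # is inside the box2's bounding box.
--
--   b1_corners = [
--     (b1_xmin, b1_ymin),
--     (b1_xmin, b1_ymax),
--     (b1_xmax, b1_ymin),
--     (b1_xmax, b1_ymax)]
--
--   status = True
--   for corner in b1_corners:
--     in_range_along_x = corner[0] < b2_xmax and corner[0] > b2_xmin
--     in_range_along_y = corner[1] < b2_ymax and corner[1] > b2_ymin
--     subcheck = in_range_along_x and in_range_along_y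
--     if not subcheck:
--         status = False
--         break
--     else :
--         status = status or subcheck
--
--   # If we get there, then the box1 is not inside that box2
--   return status
-- ===== SOURCE B (Python) =====
-- def isInside(box1, box2):
--     # Closed-form: all four corners of box1 lie strictly inside box2
--     # iff box1's x- and y-extremes lie strictly inside box2's.
--     b1_xmin = min(box1[1], box1[3]); b1_xmax = max(box1[1], box1[3])
--     b1_ymin = min(box1[0], box1[2]); b1_ymax = max(box1[0], box1[2])
--     b2_xmin = min(box2[1], box2[3]); b2_xmax = max(box2[1], box2[3])
--     b2_ymin = min(box2[0], box2[2]); b2_ymax = max(box2[0], box2[2])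
--     return (b2_xmin < b1_xmin and b1_xmax < b2_xmax
--             and b2_ymin < b1_ymin and b1_ymax < b2_ymax)
-- ===== Notes on version B (the rewrite author's own statement) =====
-- stated objective: simpler
-- what changed: Replaces the 4-corner list plus break/accumulator loop by a single closed-form strict-inequality conjunction on the box extremes.
import Mathlib
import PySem

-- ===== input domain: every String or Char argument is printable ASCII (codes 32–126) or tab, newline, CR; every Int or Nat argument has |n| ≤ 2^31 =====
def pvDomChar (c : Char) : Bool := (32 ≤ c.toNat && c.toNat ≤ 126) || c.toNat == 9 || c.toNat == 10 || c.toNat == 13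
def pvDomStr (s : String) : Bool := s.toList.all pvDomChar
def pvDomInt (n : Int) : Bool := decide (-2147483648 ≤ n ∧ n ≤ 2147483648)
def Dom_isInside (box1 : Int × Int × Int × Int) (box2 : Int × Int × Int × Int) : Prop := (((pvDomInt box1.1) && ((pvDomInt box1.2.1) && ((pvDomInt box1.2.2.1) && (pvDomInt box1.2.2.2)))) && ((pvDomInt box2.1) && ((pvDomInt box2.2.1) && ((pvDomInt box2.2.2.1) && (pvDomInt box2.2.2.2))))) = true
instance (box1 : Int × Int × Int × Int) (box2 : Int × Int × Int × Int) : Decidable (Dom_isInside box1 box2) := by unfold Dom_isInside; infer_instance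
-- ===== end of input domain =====

-- B replaces A's 4-corner list and break/accumulator loop with one closed-form conjunction on the extremes (objective: simpler).

-- ===== PORT A =====
-- the 'for corner in b1_corners' loop with its break and 'status' accumulator
def isInsideLoopA (b2xmin b2xmax b2ymin b2ymax : Int) (status : Bool) : List (Int × Int) → Bool
  | [] => status
  | corner :: rest =>
    let in_range_along_x := decide (corner.1 < b2xmax) && decide (corner.1 > b2xmin)
    let in_range_along_y := decide (corner.2 < b2ymax) && decide (corner.2 > b2ymin)
    let subcheck := in_range_along_x && in_range_along_y
    if !subcheck then false
    else isInsideLoopA b2xmin b2xmax b2ymin b2ymax (status || subcheck) rest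

def isInside (box1 : Int × Int × Int × Int) (box2 : Int × Int × Int × Int) : Bool :=
  let b1_xmin := min box1.2.1 box1.2.2.2
  let b1_xmax := max box1.2.1 box1.2.2.2
  let b1_ymin := min box1.1 box1.2.2.1
  let b1_ymax := max box1.1 box1.2.2.1
  let b2_xmin := min box2.2.1 box2.2.2.2
  let b2_xmax := max box2.2.1 box2.2.2.2
  let b2_ymin := min box2.1 box2.2.2.1
  let b2_ymax := max box2.1 box2.2.2.1
  let b1_corners := [(b1_xmin, b1_ymin), (b1_xmin, b1_ymax), (b1_xmax, b1_ymin), (b1_xmax, b1_ymax)]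
  isInsideLoopA b2_xmin b2_xmax b2_ymin b2_ymax true b1_corners

-- ===== PORT B =====
def isInside_alt (box1 : Int × Int × Int × Int) (box2 : Int × Int × Int × Int) : Bool :=
  let b1_xmin := min box1.2.1 box1.2.2.2
  let b1_xmax := max box1.2.1 box1.2.2.2
  let b1_ymin := min box1.1 box1.2.2.1
  let b1_ymax := max box1.1 box1.2.2.1
  let b2_xmin := min box2.2.1 box2.2.2.2
  let b2_xmax := max box2.2.1 box2.2.2.2
  let b2_ymin := min box2.1 box2.2.2.1
  let b2_ymax := max box2.1 box2.2.2.1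
  decide (b2_xmin < b1_xmin) && decide (b1_xmax < b2_xmax) &&
  decide (b2_ymin < b1_ymin) && decide (b1_ymax < b2_ymax)

-- ===== PRECONDITION & SPEC =====
def Spec_isInside (box1 : Int × Int × Int × Int) (box2 : Int × Int × Int × Int) (out : Bool) : Prop := out = isInside_alt box1 box2
instance (box1 : Int × Int × Int × Int) (box2 : Int × Int × Int × Int) (out : Bool) : Decidable (Spec_isInside box1 box2 out) := by unfold Spec_isInside; infer_instance

-- ===== CLAIM (what is proved, stated in full; the proofs are below) =====
def Claim_equal_isInside : Prop := ∀ (box1 : Int × Int × Int × Int) (box2 : Int × Int × Int × Int), Dom_isInside box1 box2 → Spec_isInside box1 box2 (isInside box1 box2)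

-- ===== LEMMAS AND PROOFS =====
-- A's loop on the four-corner list, characterised as the inequalities it actually checks
theorem isInsideLoopA_corners (p q r s x0 x1 y0 y1 : Int) :
    (isInsideLoopA p q r s true [(x0,y0),(x0,y1),(x1,y0),(x1,y1)] = true) ↔
    ((p < x0 ∧ x0 < q ∧ r < y0 ∧ y0 < s) ∧ (y1 < s ∧ y1 > r) ∧ (p < x1 ∧ x1 < q)) := by
  simp [isInsideLoopA]
  tauto

-- ===== VERDICT (by name: the statement is the Claim_ definition above) =====
theorem isInside_spec : Claim_equal_isInside := by
  intro box1 box2 _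
  show _ = _
  simp only [isInside, isInside_alt]
  rw [Bool.eq_iff_iff, isInsideLoopA_corners]
  simp only [Bool.and_eq_true, decide_eq_true_eq]
  omega
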